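-- pv_equiv track=rewrite | github.com/bhavink/databricks | connectors/pipelines/healthcare_ingestion/tests/test_hl7v2_parser.py | split_hl7_batch
-- ===== SOURCE A (Python) =====
-- from typing import List, Optional, Dict
--
-- def split_hl7_batch(text: str) -> List[str]:
--     """Split batch file into individual HL7v2 messages."""
--     if not text:
--         return []
--     text = text.replace("\r\n", "\n").replace("\r", "\n")
--     messages, current = [], []
--     for line in text.split("\n"):
--         line = line.strip()
--         if not line:
--             continue
--         if line.startswith("MSH"):
--             if current:
--                 messages.append("\n".join(current))
--             current = [line]
--         else:
--             current.append(line)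
--     if current:
--         messages.append("\n".join(current))
--     return messages
-- ===== SOURCE B (Python) =====
-- def split_hl7_batch(text: str) -> list:
--     """Split batch file into individual HL7v2 messages (span/take-block decomposition)."""
--     lines = [s for s in (ln.strip() for ln in text.replace("\r\n", "\n").replace("\r", "\n").split("\n")) if s]
--
--     def take_block(ls):
--         # longest prefix of non-MSH lines, and the rest
--         for idx, ln in enumerate(ls):
--             if ln.startswith("MSH"):
--                 return ls[:idx], ls[idx:]
--         return ls, []
--
--     pre, rest = take_block(lines)
--     out = ["\n".join(pre)] if pre else []
--     while rest:
--         head, tail = rest[0], rest[1:]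
--         body, rest = take_block(tail)
--         out.append("\n".join([head] + body))
--     return out
-- ===== Notes on version B (the rewrite author's own statement) =====
-- stated objective: alternative
-- what changed: A threads a (messages, current) accumulator state through one for-loop; B first cleans the lines once, then builds the result by repeatedly cutting off whole blocks at the next MSH boundary with a take_block (span) helper and slicing, keeping no accumulator state.
import Mathlib
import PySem

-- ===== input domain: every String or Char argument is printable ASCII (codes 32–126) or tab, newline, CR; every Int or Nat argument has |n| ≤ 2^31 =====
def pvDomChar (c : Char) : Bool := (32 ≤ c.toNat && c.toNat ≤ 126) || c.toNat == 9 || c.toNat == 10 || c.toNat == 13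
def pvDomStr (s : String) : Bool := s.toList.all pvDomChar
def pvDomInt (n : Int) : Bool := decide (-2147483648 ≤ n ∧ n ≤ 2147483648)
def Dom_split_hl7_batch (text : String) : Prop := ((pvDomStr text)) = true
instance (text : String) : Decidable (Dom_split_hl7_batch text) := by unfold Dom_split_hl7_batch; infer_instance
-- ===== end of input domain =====

-- B replaces A's accumulator loop (messages/current state) by a span-based decomposition:
-- clean the lines once, then repeatedly cut off one block at the next MSH boundary (objective: alternative structure, same cost).

-- ===== PORT A =====
-- the for-loop of A, state (messages, current); strips and skips inside the loop as A does
def pvALoop : List String → List String → List String → List String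
  | [], msgs, cur => if cur = [] then msgs else msgs ++ [PySem.Str.join "\n" cur]
  | l :: rest, msgs, cur =>
    let s := PySem.Str.strip l
    if s = "" then pvALoop rest msgs cur
    else if PySem.Str.startswith s "MSH" then
      pvALoop rest (if cur = [] then msgs else msgs ++ [PySem.Str.join "\n" cur]) [s]
    else pvALoop rest msgs (cur ++ [s])

def split_hl7_batch (text : String) : List String :=
  if text = "" then []
  else
    let t := PySem.Str.replace (PySem.Str.replace text "\r\n" "\n") "\r" "\n"
    match PySem.Str.split? t "\n" with   -- sep "\n" ≠ "": never none
    | some lines => pvALoop lines [] []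
    | none => []

-- ===== PORT B =====
def pvIsMsh (s : String) : Bool := PySem.Str.startswith s "MSH"

-- Source B's take_block: longest non-MSH prefix and the rest (the enumerate scan = takeWhile/dropWhile)
def pvTakeBlock (ls : List String) : List String × List String :=
  (ls.takeWhile (fun l => !pvIsMsh l), ls.dropWhile (fun l => !pvIsMsh l))

-- Source B's while loop over the remaining MSH-headed blocks
def pvBLoop : List String → List String
  | [] => []
  | h :: t =>
    PySem.Str.join "\n" (h :: (pvTakeBlock t).1) :: pvBLoop (pvTakeBlock t).2
termination_by ls => ls.length
decreasing_by
  have := List.length_dropWhile_le (fun l => !pvIsMsh l) t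
  simp [pvTakeBlock]; omega

def split_hl7_batch_alt (text : String) : List String :=
  let lines :=
    match PySem.Str.split? (PySem.Str.replace (PySem.Str.replace text "\r\n" "\n") "\r" "\n") "\n" with
    | some ls => (ls.map PySem.Str.strip).filter (· ≠ "")
    | none => []
  let pre := (pvTakeBlock lines).1
  (if pre = [] then [] else [PySem.Str.join "\n" pre]) ++ pvBLoop (pvTakeBlock lines).2

-- ===== PRECONDITION & SPEC =====
def Spec_split_hl7_batch (text : String) (out : List String) : Prop := out = split_hl7_batch_alt text
instance (text : String) (out : List String) : Decidable (Spec_split_hl7_batch text out) := by unfold Spec_split_hl7_batch; infer_instance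

-- ===== CLAIM (what is proved, stated in full; the proofs are below) =====
def Claim_equal_split_hl7_batch : Prop := ∀ (text : String), Dom_split_hl7_batch text → Spec_split_hl7_batch text (split_hl7_batch text)

-- ===== LEMMAS AND PROOFS =====

-- strip each line and drop empties, as one filterMap
def pvCleanL (ls : List String) : List String :=
  ls.filterMap (fun l => if PySem.Str.strip l = "" then none else some (PySem.Str.strip l))

def pvEmit (xs : List String) : List String :=
  if xs = [] then [] else [PySem.Str.join "\n" xs]

theorem pvCleanL_cons_skip (l : String) (rest : List String) (h : PySem.Str.strip l = "") :
    pvCleanL (l :: rest) = pvCleanL rest := by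
  simp [pvCleanL, h]

theorem pvCleanL_cons_keep (l : String) (rest : List String) (h : ¬ PySem.Str.strip l = "") :
    pvCleanL (l :: rest) = PySem.Str.strip l :: pvCleanL rest := by
  simp [pvCleanL, h]

theorem pvCleanL_eq (ls : List String) :
    (ls.map PySem.Str.strip).filter (· ≠ "") = pvCleanL ls := by
  induction ls with
  | nil => rfl
  | cons l rest ih =>
    rw [List.map_cons, List.filter_cons]
    by_cases h : PySem.Str.strip l = ""
    · rw [pvCleanL_cons_skip _ _ h, ← ih]; simp [h]
    · rw [pvCleanL_cons_keep _ _ h, ← ih]; simp [h]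

theorem pvBLoop_cons (h : String) (t : List String) :
    pvBLoop (h :: t) =
      PySem.Str.join "\n" (h :: t.takeWhile (fun l => !pvIsMsh l))
        :: pvBLoop (t.dropWhile (fun l => !pvIsMsh l)) := by
  rw [pvBLoop]; simp only [pvTakeBlock]

theorem pvALoop_cons_skip (l : String) (rest msgs cur : List String)
    (h0 : PySem.Str.strip l = "") :
    pvALoop (l :: rest) msgs cur = pvALoop rest msgs cur := by
  simp [pvALoop, h0]

theorem pvALoop_cons_msh (l : String) (rest msgs cur : List String)
    (h0 : ¬ PySem.Str.strip l = "") (h1 : PySem.Str.startswith (PySem.Str.strip l) "MSH" = true) :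
    pvALoop (l :: rest) msgs cur =
      pvALoop rest (if cur = [] then msgs else msgs ++ [PySem.Str.join "\n" cur])
        [PySem.Str.strip l] := by
  simp only [pvALoop, h0, h1, ite_false, ite_true]

theorem pvALoop_cons_other (l : String) (rest msgs cur : List String)
    (h0 : ¬ PySem.Str.strip l = "") (h1 : ¬ PySem.Str.startswith (PySem.Str.strip l) "MSH" = true) :
    pvALoop (l :: rest) msgs cur = pvALoop rest msgs (cur ++ [PySem.Str.strip l]) := by
  simp only [pvALoop, h0, h1, Bool.false_eq_true, ite_false]

theorem pvALoop_main (lines : List String) : ∀ (msgs cur : List String),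
    pvALoop lines msgs cur =
      msgs ++ pvEmit (cur ++ (pvCleanL lines).takeWhile (fun l => !pvIsMsh l))
           ++ pvBLoop ((pvCleanL lines).dropWhile (fun l => !pvIsMsh l)) := by
  induction lines with
  | nil =>
    intro msgs cur
    show (if cur = [] then msgs else msgs ++ [PySem.Str.join "\n" cur]) = _
    by_cases h : cur = [] <;> simp [h, pvCleanL, pvEmit, pvBLoop]
  | cons l rest ih =>
    intro msgs cur
    by_cases h0 : PySem.Str.strip l = ""
    · rw [pvCleanL_cons_skip l rest h0, pvALoop_cons_skip l rest msgs cur h0]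
      exact ih msgs cur
    · rw [pvCleanL_cons_keep l rest h0]
      by_cases h1 : PySem.Str.startswith (PySem.Str.strip l) "MSH" = true
      · have hP : (!pvIsMsh (PySem.Str.strip l)) = false := by
          simp only [pvIsMsh, h1, Bool.not_true]
        rw [pvALoop_cons_msh l rest msgs cur h0 h1, ih,
            List.takeWhile_cons, List.dropWhile_cons, hP]
        simp only [Bool.false_eq_true, ite_false, List.append_nil]
        rw [pvBLoop_cons]
        have he : pvEmit ([PySem.Str.strip l] ++ (pvCleanL rest).takeWhile (fun l => !pvIsMsh l)) =
            [PySem.Str.join "\n"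
              (PySem.Str.strip l :: (pvCleanL rest).takeWhile (fun l => !pvIsMsh l))] := by
          simp [pvEmit]
        rw [he]
        by_cases hc : cur = [] <;> simp [hc, pvEmit]
      · have hP : (!pvIsMsh (PySem.Str.strip l)) = true := by
          simp only [pvIsMsh, Bool.not_eq_eq_eq_not, Bool.not_true]
          exact Bool.eq_false_iff.mpr h1
        rw [pvALoop_cons_other l rest msgs cur h0 h1, ih,
            List.takeWhile_cons, List.dropWhile_cons, hP]
        simp [List.append_assoc]

-- ===== VERDICT (by name: the statement is the Claim_ definition above) =====
theorem split_hl7_batch_spec : Claim_equal_split_hl7_batch := by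
  intro text _
  show split_hl7_batch text = split_hl7_batch_alt text
  by_cases h : text = ""
  · subst h
    have h1 : PySem.Str.replace (PySem.Str.replace "" "\r\n" "\n") "\r" "\n" = "" := by decide
    have h2 : PySem.Str.split? "" "\n" = some [""] := by decide
    have h3 : PySem.Str.strip "" = "" := by decide
    simp [split_hl7_batch, split_hl7_batch_alt, h1, h2, h3, pvTakeBlock, pvBLoop]
  · simp only [split_hl7_batch, split_hl7_batch_alt, if_neg h]
    cases PySem.Str.split? (PySem.Str.replace (PySem.Str.replace text "\r\n" "\n") "\r" "\n") "\n" with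
    | none => simp [pvTakeBlock, pvBLoop]
    | some ls =>
      dsimp only
      simp only [pvCleanL_eq]
      rw [pvALoop_main ls [] []]
      simp only [List.nil_append, pvTakeBlock, pvEmit]
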